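-- pv_equiv track=rewrite | github.com/abhi6689-develop/AutoCastAbhishek | code/preprocess.py | separate_questions_by_status
-- ===== SOURCE A (Python) =====
-- def separate_questions_by_status(auto_questions, time):
--     resolved_before_time = []
--     resolved_after_time = []
--     unresolved_before_time = []
--     unresolved_after_time = []
--     for question in auto_questions:
--         if question['status'] == 'Resolved':
--             if question['close_time'] < time:
--                 resolved_before_time.append(question)
--             else:
--                 resolved_after_time.append(question)
--         else:
--             if question['publish_time'] < time:
--                 unresolved_before_time.append(question)
--             else:
--                 unresolved_after_time.append(question)
--     return resolved_before_time, resolved_after_time, unresolved_before_time, unresolved_after_time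
-- ===== SOURCE B (Python) =====
-- def separate_questions_by_status(auto_questions, time):
--     resolved_before_time = [q for q in auto_questions
--                             if q['status'] == 'Resolved' and q['close_time'] < time]
--     resolved_after_time = [q for q in auto_questions
--                            if q['status'] == 'Resolved' and not q['close_time'] < time]
--     unresolved_before_time = [q for q in auto_questions
--                               if q['status'] != 'Resolved' and q['publish_time'] < time]
--     unresolved_after_time = [q for q in auto_questions
--                              if q['status'] != 'Resolved' and not q['publish_time'] < time]
--     return resolved_before_time, resolved_after_time, unresolved_before_time, unresolved_after_time
-- ===== Notes on version B (the rewrite author's own statement) =====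
-- stated objective: simpler
-- what changed: Replaces the single four-accumulator partitioning loop with four independent list comprehensions, one full-predicate scan per output list.
import Mathlib
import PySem

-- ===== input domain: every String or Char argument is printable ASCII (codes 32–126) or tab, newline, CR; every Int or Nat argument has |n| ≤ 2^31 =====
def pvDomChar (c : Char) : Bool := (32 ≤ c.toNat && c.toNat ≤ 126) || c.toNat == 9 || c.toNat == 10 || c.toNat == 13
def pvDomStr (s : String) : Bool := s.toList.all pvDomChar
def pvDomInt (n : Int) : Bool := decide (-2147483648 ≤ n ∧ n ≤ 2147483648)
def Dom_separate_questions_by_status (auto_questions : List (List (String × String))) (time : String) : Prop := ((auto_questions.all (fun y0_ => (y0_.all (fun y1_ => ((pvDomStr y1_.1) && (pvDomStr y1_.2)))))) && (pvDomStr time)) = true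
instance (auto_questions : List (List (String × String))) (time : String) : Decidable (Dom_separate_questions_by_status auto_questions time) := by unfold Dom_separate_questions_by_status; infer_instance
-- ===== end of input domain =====

-- B replaces A's single four-accumulator partitioning loop with four independent
-- full-predicate filters, one per output list (objective: simpler decomposition).

-- q[k] for an association-list dict: first match; default used only under Pre_ (key present)
def pvQGet (q : List (String × String)) (k : String) : String := (q.lookup k).getD ""

-- ===== PORT A =====
def separate_questions_by_status (auto_questions : List (List (String × String))) (time : String) : (List (List (String × String))) × (List (List (String × String))) × (List (List (String × String))) × (List (List (String × String))) :=
  let r := auto_questions.foldl (fun acc question =>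
    if pvQGet question "status" = "Resolved" then
      if pvQGet question "close_time" < time then
        (acc.1 ++ [question], acc.2.1, acc.2.2.1, acc.2.2.2)
      else
        (acc.1, acc.2.1 ++ [question], acc.2.2.1, acc.2.2.2)
    else
      if pvQGet question "publish_time" < time then
        (acc.1, acc.2.1, acc.2.2.1 ++ [question], acc.2.2.2)
      else
        (acc.1, acc.2.1, acc.2.2.1, acc.2.2.2 ++ [question])) ([], [], [], [])
  r

-- ===== PORT B =====
def separate_questions_by_status_alt (auto_questions : List (List (String × String))) (time : String) : (List (List (String × String))) × (List (List (String × String))) × (List (List (String × String))) × (List (List (String × String))) :=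
  (auto_questions.filter (fun q => pvQGet q "status" == "Resolved" && pvQGet q "close_time" < time),
   auto_questions.filter (fun q => pvQGet q "status" == "Resolved" && !(pvQGet q "close_time" < time)),
   auto_questions.filter (fun q => pvQGet q "status" != "Resolved" && pvQGet q "publish_time" < time),
   auto_questions.filter (fun q => pvQGet q "status" != "Resolved" && !(pvQGet q "publish_time" < time)))

-- ===== PRECONDITION & SPEC =====
-- Pre_ excludes inputs on which the Python raises KeyError: every question must have
-- a 'status' key, and the time key its branch reads ('close_time' if Resolved, else
-- 'publish_time') must be present.
def Pre_separate_questions_by_status (auto_questions : List (List (String × String))) (time : String) : Prop :=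
  (auto_questions.all (fun q =>
    (q.lookup "status").isSome &&
    (if (q.lookup "status").getD "" = "Resolved" then (q.lookup "close_time").isSome
     else (q.lookup "publish_time").isSome))) = true
instance (auto_questions : List (List (String × String))) (time : String) : Decidable (Pre_separate_questions_by_status auto_questions time) := by unfold Pre_separate_questions_by_status; infer_instance

def pvWitness_separate_questions_by_status : (List (List (String × String))) × String :=
  ([[("status", "Resolved"), ("close_time", "2020")], [("status", "Open"), ("publish_time", "2023")]], "2022")

def Spec_separate_questions_by_status (auto_questions : List (List (String × String))) (time : String) (out : (List (List (String × String))) × (List (List (String × String))) × (List (List (String × String))) × (List (List (String × String)))) : Prop := out = separate_questions_by_status_alt auto_questions time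
instance (auto_questions : List (List (String × String))) (time : String) (out : (List (List (String × String))) × (List (List (String × String))) × (List (List (String × String))) × (List (List (String × String)))) : Decidable (Spec_separate_questions_by_status auto_questions time out) := by unfold Spec_separate_questions_by_status; infer_instance

-- ===== CLAIM (what is proved, stated in full; the proofs are below) =====
def Claim_equal_separate_questions_by_status : Prop := ∀ (auto_questions : List (List (String × String))) (time : String), Dom_separate_questions_by_status auto_questions time → Pre_separate_questions_by_status auto_questions time → Spec_separate_questions_by_status auto_questions time (separate_questions_by_status auto_questions time)

-- ===== LEMMAS AND PROOFS =====

-- loop invariant: A's fold, started from any accumulators, appends B's four filters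
theorem pvFold_eq_filters (l : List (List (String × String))) (time : String)
    (r1 r2 r3 r4 : List (List (String × String))) :
    l.foldl (fun acc question =>
      if pvQGet question "status" = "Resolved" then
        if pvQGet question "close_time" < time then
          (acc.1 ++ [question], acc.2.1, acc.2.2.1, acc.2.2.2)
        else
          (acc.1, acc.2.1 ++ [question], acc.2.2.1, acc.2.2.2)
      else
        if pvQGet question "publish_time" < time then
          (acc.1, acc.2.1, acc.2.2.1 ++ [question], acc.2.2.2)
        else
          (acc.1, acc.2.1, acc.2.2.1, acc.2.2.2 ++ [question])) (r1, r2, r3, r4) =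
    (r1 ++ l.filter (fun q => pvQGet q "status" == "Resolved" && pvQGet q "close_time" < time),
     r2 ++ l.filter (fun q => pvQGet q "status" == "Resolved" && !(pvQGet q "close_time" < time)),
     r3 ++ l.filter (fun q => pvQGet q "status" != "Resolved" && pvQGet q "publish_time" < time),
     r4 ++ l.filter (fun q => pvQGet q "status" != "Resolved" && !(pvQGet q "publish_time" < time))) := by
  induction l generalizing r1 r2 r3 r4 with
  | nil => simp
  | cons q t ih =>
    by_cases h1 : pvQGet q "status" = "Resolved"
    · by_cases h2 : pvQGet q "close_time" < time
      · simp only [List.foldl_cons, if_pos h1, if_pos h2, ih]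
        have h2' : (pvQGet q "close_time").toList < time.toList := by simpa using h2
        simp [h1, h2']
      · simp only [List.foldl_cons, if_pos h1, if_neg h2, ih]
        have h2' : ¬ (pvQGet q "close_time").toList < time.toList := by simpa using h2
        simp [h1, h2']
    · by_cases h2 : pvQGet q "publish_time" < time
      · simp only [List.foldl_cons, if_neg h1, if_pos h2, ih]
        have h2' : (pvQGet q "publish_time").toList < time.toList := by simpa using h2
        simp [h1, h2']
      · simp only [List.foldl_cons, if_neg h1, if_neg h2, ih]
        have h2' : ¬ (pvQGet q "publish_time").toList < time.toList := by simpa using h2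
        simp [h1, h2']

-- ===== VERDICT (by name: the statement is the Claim_ definition above) =====
theorem separate_questions_by_status_spec : Claim_equal_separate_questions_by_status := by
  intro aq time _ _
  show _ = _
  unfold separate_questions_by_status separate_questions_by_status_alt
  rw [pvFold_eq_filters]
  simp
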